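-- pv_equiv track=rewrite | github.com/dmytro72/6009 | labs/lab2w02/lab.py | get_actors_with_bacon_number
-- ===== SOURCE A (Python) =====
-- def get_actors_with_bacon_number(data, n):
--     """Return set of actor ids with Bacon number of n"""
--     BACON_NUMBER = 4724
--     # if Bacon number is 0 return Bacon id
--     if n == 0:
--         return {BACON_NUMBER}
--     # actors graph is {actor_id: {set of other_actor_ids act with actor}}
--     id_graph = get_actors_graph(data)
--     id_set = closed = {BACON_NUMBER}
--     for i in range(n):
--         aux = set()
--         for actor_id in id_set:
--             aux |= set(id_graph[actor_id])
--         id_set = aux - closed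
--         # if actors set empty stop computing
--         if len(id_set) == 0:
--             break
--         closed |= id_set
--     return id_set
--
-- def get_actors_graph(data):
--     """Create graph of actors as {actor_id: {set of other_actor_id, which act with that actor}}"""
--     actors_graph = {}
--     for id_1, id_2, _ in data:
--         for a, b in ((id_1, id_2), (id_2, id_1)):
--             actors_graph.setdefault(a, set()).add(b)
--     return actors_graph
-- ===== SOURCE B (Python) =====
-- def get_actors_with_bacon_number(data, n):
--     """Return set of actor ids with Bacon number of n (queue-based BFS over a distance map)."""
--     BACON_NUMBER = 4724
--     # if Bacon number is 0 return Bacon id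
--     if n == 0:
--         return {BACON_NUMBER}
--     graph = {}
--     for id_1, id_2, _ in data:
--         graph.setdefault(id_1, set()).add(id_2)
--         graph.setdefault(id_2, set()).add(id_1)
--     dist = {BACON_NUMBER: 0}
--     queue = [BACON_NUMBER]
--     while queue:
--         node = queue.pop(0)
--         d = dist[node]
--         neighbors = graph[node]
--         if d < n:
--             for neighbor in neighbors:
--                 if neighbor not in dist:
--                     dist[neighbor] = d + 1
--                     queue.append(neighbor)
--     return {actor for actor, d in dist.items() if d == n}
-- ===== Notes on version B (the rewrite author's own statement) =====
-- stated objective: alternative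
-- what changed: Replaces the level-synchronous set-frontier expansion (aux unions minus a growing closed set, one pass per level) by a single FIFO-queue BFS that maintains a per-node distance map and finally collects the nodes at distance exactly n.
-- intended difference: For n < 0 (with Bacon id 4724 present in data) A returns {4724} because its range(n) loop never runs and the initial frontier is left over, while B returns the empty set, the intended answer since no actor has a negative Bacon number. — e.g. on get_actors_with_bacon_number([(4724, 1, 0)], -1): A returns [4724], B returns []
-- outside the precondition, e.g. on get_actors_with_bacon_number([], -1): A returns {4724}, B raises KeyError
import Mathlib
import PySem

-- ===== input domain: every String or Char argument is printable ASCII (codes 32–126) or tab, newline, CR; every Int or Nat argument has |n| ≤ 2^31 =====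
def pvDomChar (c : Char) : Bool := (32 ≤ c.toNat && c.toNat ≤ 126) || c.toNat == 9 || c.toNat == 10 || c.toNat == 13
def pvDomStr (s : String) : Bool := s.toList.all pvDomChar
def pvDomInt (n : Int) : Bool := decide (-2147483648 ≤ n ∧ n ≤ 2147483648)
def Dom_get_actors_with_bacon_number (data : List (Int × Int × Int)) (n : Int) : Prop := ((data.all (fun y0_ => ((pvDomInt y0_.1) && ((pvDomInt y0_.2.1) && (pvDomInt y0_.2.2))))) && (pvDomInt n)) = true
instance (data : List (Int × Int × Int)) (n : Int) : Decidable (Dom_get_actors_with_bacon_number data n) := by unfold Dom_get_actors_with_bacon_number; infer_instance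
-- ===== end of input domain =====

-- B replaces A's level-synchronous set-frontier expansion by a FIFO-queue BFS over a per-node
-- distance map, collecting at the end the nodes at distance exactly n (objective: alternative).

-- ===== PORT A =====
-- get_actors_graph: actors_graph.setdefault(a, set()).add(b) for both orientations of each pair
def pvGraphA (data : List (Int × Int × Int)) : PySem.Dict Int (PySem.Set Int) :=
  data.foldl (fun g t =>
    [(t.1, t.2.1), (t.2.1, t.1)].foldl
      (fun g p => g.insert p.1 (PySem.Set.add (g.getD p.1 PySem.Set.empty) p.2)) g)
    PySem.Dict.empty

-- the 'for i in range(n)' loop; 'id_graph[actor_id]' raises KeyError only when 4724 is not a key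
-- (every later frontier member is a key by symmetry of the graph), so getD is exact under Pre_
def pvLoopA (g : PySem.Dict Int (PySem.Set Int)) :
    Nat → PySem.Set Int → PySem.Set Int → PySem.Set Int
  | 0, ids, _ => ids
  | k+1, ids, closed =>
      let aux := ids.foldl (fun a x => PySem.Set.union a (g.getD x PySem.Set.empty)) PySem.Set.empty
      let ids' := PySem.Set.diff aux closed
      if PySem.Set.len ids' = 0 then ids'
      else pvLoopA g k ids' (PySem.Set.union closed ids')

def get_actors_with_bacon_number (data : List (Int × Int × Int)) (n : Int) : List Int :=
  if n = 0 then [4724]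
  else pvLoopA (pvGraphA data) n.toNat (PySem.Set.ofList [4724]) (PySem.Set.ofList [4724])

-- ===== PORT B =====
def pvGraphB (data : List (Int × Int × Int)) : PySem.Dict Int (PySem.Set Int) :=
  data.foldl (fun g t =>
    let g1 := g.insert t.1 (PySem.Set.add (g.getD t.1 PySem.Set.empty) t.2.1)
    g1.insert t.2.1 (PySem.Set.add (g1.getD t.2.1 PySem.Set.empty) t.1))
    PySem.Dict.empty

-- the 'while queue' loop; fuel 1 + 2*len(data) bounds the number of pops (each popped node was
-- enqueued exactly once and enqueued nodes are distinct members of {4724} ∪ nodes(data)); it is a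
-- totality device only, proved sufficient below.  'dist[node]' is exact as getD (node is always a
-- key) and 'graph[node]' is exact as getD under Pre_ (same KeyError situation as in A).
def pvBfs (g : PySem.Dict Int (PySem.Set Int)) (n : Int) :
    Nat → List Int → PySem.Dict Int Int → PySem.Dict Int Int
  | 0, _, dist => dist
  | _+1, [], dist => dist
  | f+1, node :: queue, dist =>
      let d := dist.getD node 0
      let neighbors := g.getD node PySem.Set.empty
      if d < n then
        let s := neighbors.foldl
          (fun (s : PySem.Dict Int Int × List Int) nb =>
            if s.1.contains nb then s else (s.1.insert nb (d + 1), s.2 ++ [nb]))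
          (dist, queue)
        pvBfs g n f s.2 s.1
      else pvBfs g n f queue dist

def get_actors_with_bacon_number_alt (data : List (Int × Int × Int)) (n : Int) : List Int :=
  if n = 0 then [4724]
  else
    let g := pvGraphB data
    let dist := pvBfs g n (1 + 2 * data.length) [4724] (PySem.Dict.empty.insert 4724 0)
    PySem.Set.ofList ((dist.items.filter (fun p => p.2 == n)).map (fun p => p.1))

-- ===== PRECONDITION & SPEC =====
-- Pre_ excludes the inputs with n ≠ 0 on which actor 4724 never occurs in data: for n ≥ 1 both
-- Pythons raise KeyError there, and for n < 0 A returns {4724} (its loop never runs) while B's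
-- 'graph[node]' raises KeyError.
def Pre_get_actors_with_bacon_number (data : List (Int × Int × Int)) (n : Int) : Prop :=
  n = 0 ∨ 4724 ∈ data.flatMap (fun t => [t.1, t.2.1])
instance (data : List (Int × Int × Int)) (n : Int) : Decidable (Pre_get_actors_with_bacon_number data n) := by unfold Pre_get_actors_with_bacon_number; infer_instance
def pvWitness_get_actors_with_bacon_number : (List (Int × Int × Int)) × Int := ([(4724, 1, 0)], 1)

-- For n < 0 (4724 present in data) A returns {4724} — its range(n) loop never runs and the initial
-- frontier is left over — while B returns the empty set, the intended answer since no actor has a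
-- negative Bacon number.
def D_get_actors_with_bacon_number (data : List (Int × Int × Int)) (n : Int) : Prop := n < 0
instance (data : List (Int × Int × Int)) (n : Int) : Decidable (D_get_actors_with_bacon_number data n) := by unfold D_get_actors_with_bacon_number; infer_instance

def Spec_get_actors_with_bacon_number (data : List (Int × Int × Int)) (n : Int) (out : List Int) : Prop := ¬ D_get_actors_with_bacon_number data n → out = get_actors_with_bacon_number_alt data n
instance (data : List (Int × Int × Int)) (n : Int) (out : List Int) : Decidable (Spec_get_actors_with_bacon_number data n out) := by unfold Spec_get_actors_with_bacon_number; infer_instance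

def pvDiffWitness_get_actors_with_bacon_number : (List (Int × Int × Int)) × Int := ([(4724, 1, 0)], -1)
def pvDiffWitnessOut_get_actors_with_bacon_number : (List Int) × (List Int) := ([4724], [])

-- ===== CLAIM (what is proved, stated in full; the proofs are below) =====
def Claim_unchanged_get_actors_with_bacon_number : Prop := ∀ (data : List (Int × Int × Int)) (n : Int), Dom_get_actors_with_bacon_number data n → Pre_get_actors_with_bacon_number data n → Spec_get_actors_with_bacon_number data n (get_actors_with_bacon_number data n)
def Claim_changed_get_actors_with_bacon_number : Prop := Dom_get_actors_with_bacon_number (pvDiffWitness_get_actors_with_bacon_number.1) (pvDiffWitness_get_actors_with_bacon_number.2) ∧ Pre_get_actors_with_bacon_number (pvDiffWitness_get_actors_with_bacon_number.1) (pvDiffWitness_get_actors_with_bacon_number.2) ∧ D_get_actors_with_bacon_number (pvDiffWitness_get_actors_with_bacon_number.1) (pvDiffWitness_get_actors_with_bacon_number.2) ∧ get_actors_with_bacon_number (pvDiffWitness_get_actors_with_bacon_number.1) (pvDiffWitness_get_actors_with_bacon_number.2) = pvDiffWitnessOut_get_actors_with_bacon_number.1 ∧ get_actors_with_bacon_number_alt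 (pvDiffWitness_get_actors_with_bacon_number.1) (pvDiffWitness_get_actors_with_bacon_number.2) = pvDiffWitnessOut_get_actors_with_bacon_number.2 ∧ pvDiffWitnessOut_get_actors_with_bacon_number.1 ≠ pvDiffWitnessOut_get_actors_with_bacon_number.2
def Claim_exact_get_actors_with_bacon_number : Prop := ∀ (data : List (Int × Int × Int)) (n : Int), Dom_get_actors_with_bacon_number data n → Pre_get_actors_with_bacon_number data n → D_get_actors_with_bacon_number data n → get_actors_with_bacon_number data n ≠ get_actors_with_bacon_number_alt data n


-- ===== LEMMAS AND PROOFS =====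

def pvAdj (g : PySem.Dict Int (PySem.Set Int)) (x : Int) : List Int :=
  g.getD x PySem.Set.empty

def pvNew (g : PySem.Dict Int (PySem.Set Int)) : List Int → List Int → List Int
  | _, [] => []
  | seen, x :: xs =>
      let ns := (pvAdj g x).filter (fun y => decide (y ∉ seen))
      ns ++ pvNew g (seen ++ ns) xs

def pvSel : List Int → List Int → List Int
  | _, [] => []
  | seen, y :: ys => if y ∈ seen then pvSel seen ys else y :: pvSel (seen ++ [y]) ys

lemma pvSel_congr : ∀ (ys s₁ s₂ : List Int), (∀ z : Int, z ∈ s₁ ↔ z ∈ s₂) →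
    pvSel s₁ ys = pvSel s₂ ys := by
  intro ys
  induction ys with
  | nil => intro _ _ _; rfl
  | cons y ys ih =>
      intro s₁ s₂ h
      simp only [pvSel]
      by_cases hy : y ∈ s₁
      · rw [if_pos hy, if_pos ((h y).mp hy), ih _ _ h]
      · rw [if_neg hy, if_neg (fun hc => hy ((h y).mpr hc))]
        congr 1
        apply ih
        intro z; simp [h z]

lemma pvNew_not_mem_seen (g : PySem.Dict Int (PySem.Set Int)) :
    ∀ (ids seen : List Int) (y : Int), y ∈ pvNew g seen ids → y ∉ seen := by
  intro ids
  induction ids with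
  | nil => intro seen y h; simp [pvNew] at h
  | cons x xs ih =>
      intro seen y h
      simp only [pvNew, List.mem_append] at h
      rcases h with h | h
      · simp only [List.mem_filter, decide_eq_true_eq] at h
        exact h.2
      · intro hc
        exact ih _ y h (by simp [hc])

lemma pvNew_nodup (g : PySem.Dict Int (PySem.Set Int)) (hadjn : ∀ x, (pvAdj g x).Nodup) :
    ∀ (ids seen : List Int), (pvNew g seen ids).Nodup := by
  intro ids
  induction ids with
  | nil => intro seen; simp [pvNew]
  | cons x xs ih =>
      intro seen
      simp only [pvNew]
      apply List.Nodup.append ((hadjn x).filter _) (ih _)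
      intro y hy hy'
      exact pvNew_not_mem_seen g _ _ y hy' (List.mem_append.mpr (Or.inr hy))

lemma pvNew_subset_adj (g : PySem.Dict Int (PySem.Set Int)) :
    ∀ (ids seen : List Int) (y : Int), y ∈ pvNew g seen ids → ∃ x, y ∈ pvAdj g x := by
  intro ids
  induction ids with
  | nil => intro seen y h; simp [pvNew] at h
  | cons x xs ih =>
      intro seen y h
      simp only [pvNew, List.mem_append] at h
      rcases h with h | h
      · exact ⟨x, (List.mem_filter.mp h).1⟩
      · exact ih _ y h

lemma pvDiff_foldl_add : ∀ (ys s seen : List Int),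
    PySem.Set.diff (ys.foldl PySem.Set.add s) seen =
      PySem.Set.diff s seen ++ pvSel (s ++ seen) ys := by
  intro ys
  induction ys with
  | nil => intro s seen; simp [pvSel]
  | cons y ys ih =>
      intro s seen
      simp only [List.foldl_cons]
      by_cases hy : y ∈ s
      · rw [PySem.Set.add_of_mem hy, ih]
        simp only [pvSel]
        rw [if_pos (by simp [hy])]
      · rw [PySem.Set.add_of_not_mem hy, ih]
        simp only [pvSel]
        by_cases hys : y ∈ seen
        · rw [if_pos (List.mem_append.mpr (Or.inr hys))]
          have hdiff : PySem.Set.diff (s ++ [y]) seen = PySem.Set.diff s seen := by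
            simp only [PySem.Set.diff, List.filter_append, List.filter_cons]
            have hc : PySem.Set.contains seen y = true := (PySem.Set.contains_iff seen y).mpr hys
            simp [hc, hys]
          rw [hdiff]
          congr 1
          apply pvSel_congr
          intro z
          simp only [List.mem_append, List.mem_singleton]
          constructor
          · rintro ((h | rfl) | h)
            · exact Or.inl h
            · exact Or.inr hys
            · exact Or.inr h
          · rintro (h | h)
            · exact Or.inl (Or.inl h)
            · exact Or.inr h
        · rw [if_neg (fun hc => (List.mem_append.mp hc).elim hy hys)]
          have hdiff : PySem.Set.diff (s ++ [y]) seen = PySem.Set.diff s seen ++ [y] := by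
            simp only [PySem.Set.diff, List.filter_append, List.filter_cons]
            have : PySem.Set.contains seen y = false := by
              rw [← Bool.not_eq_true]; intro hc
              exact hys ((PySem.Set.contains_iff seen y).mp hc)
            simp [this, hys]
          rw [hdiff, List.append_assoc]
          congr 1
          rw [List.singleton_append]
          congr 1
          apply pvSel_congr
          intro z
          simp only [List.mem_append, List.mem_singleton]
          tauto

lemma pvFoldl_union_eq (g : PySem.Dict Int (PySem.Set Int)) :
    ∀ (ids a : List Int),
      ids.foldl (fun a x => PySem.Set.union a (pvAdj g x)) a =
        (ids.flatMap (pvAdj g)).foldl PySem.Set.add a := by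
  intro ids
  induction ids with
  | nil => intro a; rfl
  | cons x xs ih =>
      intro a
      simp only [List.foldl_cons, List.flatMap_cons, List.foldl_append]
      rw [ih]
      rfl

lemma pvSel_chunk : ∀ (ns : List Int), ns.Nodup → ∀ (seen rest : List Int),
    pvSel seen (ns ++ rest) =
      ns.filter (fun y => decide (y ∉ seen)) ++
        pvSel (seen ++ ns.filter (fun y => decide (y ∉ seen))) rest := by
  intro ns
  induction ns with
  | nil => intro _ seen rest; simp [pvSel]
  | cons y ns ih =>
      intro hnd seen rest
      have hy : y ∉ ns := (List.nodup_cons.mp hnd).1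
      have hnd' : ns.Nodup := (List.nodup_cons.mp hnd).2
      simp only [List.cons_append, pvSel, List.filter_cons]
      by_cases hys : y ∈ seen
      · rw [if_pos hys]
        simp only [hys, not_true_eq_false, decide_false, if_false]
        exact ih hnd' seen rest
      · rw [if_neg hys]
        simp only [hys, not_false_eq_true, decide_true, if_true]
        rw [ih hnd' (seen ++ [y]) rest]
        have hfil : ns.filter (fun z => decide (z ∉ seen ++ [y])) =
            ns.filter (fun z => decide (z ∉ seen)) := by
          apply List.filter_congr
          intro z hz
          have hzy : z ≠ y := fun hc => hy (hc ▸ hz)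
          simp [List.mem_append, hzy]
        rw [hfil, List.cons_append]
        congr 1
        congr 1
        rw [List.append_assoc, List.singleton_append]

lemma pvSel_eq_pvNew (g : PySem.Dict Int (PySem.Set Int)) (hadjn : ∀ x, (pvAdj g x).Nodup) :
    ∀ (ids seen : List Int), pvSel seen (ids.flatMap (pvAdj g)) = pvNew g seen ids := by
  intro ids
  induction ids with
  | nil => intro seen; rfl
  | cons x xs ih =>
      intro seen
      simp only [List.flatMap_cons, pvNew]
      rw [pvSel_chunk (pvAdj g x) (hadjn x) seen]
      rw [ih]

lemma pvA_level (g : PySem.Dict Int (PySem.Set Int)) (hadjn : ∀ x, (pvAdj g x).Nodup)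
    (ids closed : List Int) :
    PySem.Set.diff
      (ids.foldl (fun a x => PySem.Set.union a (g.getD x PySem.Set.empty)) PySem.Set.empty)
      closed = pvNew g closed ids := by
  have h1 : (fun (a : PySem.Set Int) (x : Int) => PySem.Set.union a (g.getD x PySem.Set.empty)) =
      (fun a x => PySem.Set.union a (pvAdj g x)) := rfl
  rw [h1, pvFoldl_union_eq g ids PySem.Set.empty, pvDiff_foldl_add]
  rw [pvSel_eq_pvNew g hadjn]
  rfl

lemma pvFold_fresh : ∀ (nbs : List Int), nbs.Nodup →
    ∀ (dist : PySem.Dict Int Int) (q : List Int) (v : Int),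
    nbs.foldl
      (fun (s : PySem.Dict Int Int × List Int) nb =>
        if s.1.contains nb then s else (s.1.insert nb v, s.2 ++ [nb]))
      (dist, q) =
    (PySem.Dict.mk (dist.items ++ (nbs.filter (fun y => decide (y ∉ dist.keys))).map (fun y => (y, v))),
     q ++ nbs.filter (fun y => decide (y ∉ dist.keys))) := by
  intro nbs
  induction nbs with
  | nil => intro _ dist q v; simp
  | cons nb nbs ih =>
      intro hnd dist q v
      have hnb : nb ∉ nbs := (List.nodup_cons.mp hnd).1
      have hnd' : nbs.Nodup := (List.nodup_cons.mp hnd).2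
      simp only [List.foldl_cons, List.filter_cons]
      by_cases hc : dist.contains nb = true
      · have hmem : nb ∈ dist.keys := by
          rw [PySem.Dict.contains_eq_decide_mem_keys] at hc
          exact of_decide_eq_true hc
        rw [hc]
        simp only [hmem, not_true_eq_false, decide_false, if_false]
        exact ih hnd' dist q v
      · have hc' : dist.contains nb = false := by
          cases h : dist.contains nb
          · rfl
          · exact absurd h hc
        have hmem : nb ∉ dist.keys := by
          rw [PySem.Dict.contains_eq_decide_mem_keys] at hc'
          simpa using hc'
        rw [hc']
        simp only [if_false, hmem, not_false_eq_true, decide_true, if_true, Bool.false_eq_true]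
        rw [ih hnd' (dist.insert nb v) (q ++ [nb]) v]
        have hitems : (dist.insert nb v).items = dist.items ++ [(nb, v)] :=
          PySem.Dict.items_insert_of_not_contains dist v hc'
        have hkeys : (dist.insert nb v).keys = dist.keys ++ [nb] := by
          simp only [PySem.Dict.keys, hitems, List.map_append, List.map_cons, List.map_nil]
        have hfil : nbs.filter (fun y => decide (y ∉ (dist.insert nb v).keys)) =
            nbs.filter (fun y => decide (y ∉ dist.keys)) := by
          apply List.filter_congr
          intro z hz
          have hzy : z ≠ nb := fun hcc => hnb (hcc ▸ hz)
          simp [hkeys, List.mem_append, hzy]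
        rw [hfil, hitems]
        simp

lemma pvGet?_extend (d : PySem.Dict Int Int) (extra : List (Int × Int)) (x : Int) (v : Int)
    (h : d.get? x = some v) : (PySem.Dict.mk (d.items ++ extra)).get? x = some v := by
  simp only [PySem.Dict.get?] at h ⊢
  obtain ⟨p, hp, hpx⟩ : ∃ p, d.items.find? (fun p => p.1 == x) = some p ∧ p.2 = v := by
    cases hf : d.items.find? (fun p => p.1 == x) with
    | none => rw [hf] at h; simp at h
    | some p => rw [hf] at h; simp at h; exact ⟨p, rfl, h⟩
  rw [List.find?_append, hp]
  simp [hpx]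

lemma pvBfs_nilq (g : PySem.Dict Int (PySem.Set Int)) (n : Int) :
    ∀ (f : Nat) (dist : PySem.Dict Int Int), pvBfs g n f [] dist = dist := by
  intro f dist
  cases f <;> rfl

lemma pvBfs_level (g : PySem.Dict Int (PySem.Set Int)) (n ℓ : Int)
    (hadjn : ∀ x, (pvAdj g x).Nodup) (hℓ : ℓ < n) :
    ∀ (ids acc : List Int) (dist : PySem.Dict Int Int) (f : Nat),
    dist.keys.Nodup →
    (∀ x ∈ ids, dist.get? x = some ℓ) →
    pvBfs g n (ids.length + f) (ids ++ acc) dist =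
      pvBfs g n f (acc ++ pvNew g dist.keys ids)
        (PySem.Dict.mk (dist.items ++ (pvNew g dist.keys ids).map (fun y => (y, ℓ + 1)))) := by
  intro ids
  induction ids with
  | nil =>
      intro acc dist f _ _
      simp [pvNew]
  | cons x xs ih =>
      intro acc dist f hk hids
      have hx : dist.get? x = some ℓ := hids x (by simp)
      have hgd : dist.getD x 0 = ℓ := PySem.Dict.getD_of_get?_eq_some dist 0 hx
      have hfuel : (x :: xs).length + f = (xs.length + f) + 1 := by
        simp [List.length_cons]; omega
      rw [hfuel]
      show (let d := dist.getD x 0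
            let neighbors := g.getD x PySem.Set.empty
            if d < n then
              let s := neighbors.foldl
                (fun (s : PySem.Dict Int Int × List Int) nb =>
                  if s.1.contains nb then s else (s.1.insert nb (d + 1), s.2 ++ [nb]))
                (dist, xs ++ acc)
              pvBfs g n (xs.length + f) s.2 s.1
            else pvBfs g n (xs.length + f) (xs ++ acc) dist) = _
      simp only [hgd, if_pos hℓ]
      simp only [show g.getD x PySem.Set.empty = pvAdj g x from rfl]
      rw [pvFold_fresh (pvAdj g x) (hadjn x) dist (xs ++ acc) (ℓ + 1)]
      set ns := (pvAdj g x).filter (fun y => decide (y ∉ dist.keys)) with hns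
      set dist₂ := PySem.Dict.mk (dist.items ++ ns.map (fun y => (y, ℓ + 1))) with hd2
      have hitems2 : dist₂.items = dist.items ++ ns.map (fun y => (y, ℓ + 1)) := rfl
      have hkeys2 : dist₂.keys = dist.keys ++ ns := by
        simp only [PySem.Dict.keys, hitems2, List.map_append]
        congr 1
        induction ns with
        | nil => rfl
        | cons a l ihn => simp [ihn]
      have hnsnodup : ns.Nodup := (hadjn x).filter _
      have hnsfresh : ∀ y ∈ ns, y ∉ dist.keys := by
        intro y hy
        have := (List.mem_filter.mp hy).2
        simpa using this
      have hk2 : dist₂.keys.Nodup := by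
        rw [hkeys2]
        exact List.Nodup.append hk hnsnodup (fun y hy hy' => hnsfresh y hy' hy)
      have hids2 : ∀ x' ∈ xs, dist₂.get? x' = some ℓ := by
        intro x' hx'
        exact pvGet?_extend dist _ x' ℓ (hids x' (by simp [hx']))
      have harr : (xs ++ acc) ++ ns = xs ++ (acc ++ ns) := by simp
      rw [harr]
      rw [ih (acc ++ ns) dist₂ f hk2 hids2]
      have hnew : pvNew g dist.keys (x :: xs) = ns ++ pvNew g (dist.keys ++ ns) xs := rfl
      rw [hnew, hkeys2, hitems2]
      congr 1
      · simp
      · congr 1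
        simp

lemma pvBfs_drain (g : PySem.Dict Int (PySem.Set Int)) (n : Int) :
    ∀ (L : List Int) (f : Nat) (dist : PySem.Dict Int Int),
    (∀ x ∈ L, ¬ (dist.getD x 0 < n)) →
    pvBfs g n (L.length + f) L dist = dist := by
  intro L
  induction L with
  | nil => intro f dist _; exact pvBfs_nilq g n _ dist
  | cons x xs ih =>
      intro f dist h
      have hfuel : (x :: xs).length + f = (xs.length + f) + 1 := by
        simp [List.length_cons]; omega
      rw [hfuel]
      show (let d := dist.getD x 0
            let neighbors := g.getD x PySem.Set.empty
            if d < n then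
              let s := neighbors.foldl
                (fun (s : PySem.Dict Int Int × List Int) nb =>
                  if s.1.contains nb then s else (s.1.insert nb (d + 1), s.2 ++ [nb]))
                (dist, xs)
              pvBfs g n (xs.length + f) s.2 s.1
            else pvBfs g n (xs.length + f) xs dist) = _
      simp only [if_neg (h x (by simp))]
      exact ih f dist (fun y hy => h y (by simp [hy]))

lemma pvLen_le {l₁ l₂ : List Int} (h₁ : l₁.Nodup) (hsub : l₁ ⊆ l₂) :
    l₁.length ≤ l₂.length := by
  calc l₁.length = l₁.toFinset.card := (List.toFinset_card_of_nodup h₁).symm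
    _ ≤ l₂.toFinset.card := Finset.card_le_card (fun a ha => by
        simp only [List.mem_toFinset] at ha ⊢
        exact hsub ha)
    _ ≤ l₂.length := l₂.toFinset_card_le

lemma pvMapFst (v : Int) (l : List Int) :
    (l.map (fun x => (x, v))).map (fun p : Int × Int => p.1) = l := by
  induction l with
  | nil => rfl
  | cons a t ih => simp [ih]

lemma pvMain (g : PySem.Dict Int (PySem.Set Int)) (n : Int) (allN : List Int)
    (hadjn : ∀ x, (pvAdj g x).Nodup)
    (hadjsub : ∀ x y, y ∈ pvAdj g x → y ∈ allN) :
    ∀ (k : Nat) (ids : List Int) (dist : PySem.Dict Int Int) (P : List (Int × Int)) (ℓ : Int) (f : Nat),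
    dist.items = P ++ ids.map (fun x => (x, ℓ)) →
    (∀ p ∈ P, p.2 < ℓ) →
    ids.Nodup →
    dist.keys.Nodup →
    (∀ x ∈ dist.keys, x ∈ allN) →
    allN.length ≤ f + P.length →
    ℓ + (k : Int) = n →
    1 ≤ k →
    PySem.Set.ofList
        (((pvBfs g n f ids dist).items.filter (fun p => p.2 == n)).map (fun p => p.1))
      = pvLoopA g k ids dist.keys := by
  intro k
  induction k with
  | zero => intro _ _ _ _ _ _ _ _ _ _ _ h5; omega
  | succ k ih =>
      intro ids dist P ℓ f h1 h2 h7 h8 hsub h9 h4 _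
      have hℓn : ℓ < n := by
        push_cast at h4
        omega
      have hkeyseq : dist.keys = P.map (fun p => p.1) ++ ids := by
        simp only [PySem.Dict.keys, h1, List.map_append]
        rw [pvMapFst ℓ ids]
      have hlenkeys : dist.keys.length = P.length + ids.length := by
        simp [hkeyseq]
      have hidsf : ids.length ≤ f := by
        have := pvLen_le h8 (fun x hx => hsub x hx)
        omega
      have hids : ∀ x ∈ ids, dist.get? x = some ℓ := by
        intro x hx
        apply PySem.Dict.get?_of_mem_items dist _ h8
        rw [h1]
        exact List.mem_append.mpr (Or.inr (List.mem_map.mpr ⟨x, hx, rfl⟩))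
      have hf : f = ids.length + (f - ids.length) := by omega
      set f₀ := f - ids.length with hf₀
      -- run one level of the BFS
      have hrun : pvBfs g n f ids dist =
          pvBfs g n f₀ (pvNew g dist.keys ids)
            (PySem.Dict.mk (dist.items ++ (pvNew g dist.keys ids).map (fun y => (y, ℓ + 1)))) := by
        have h := pvBfs_level g n ℓ hadjn hℓn ids [] dist f₀ h8 hids
        simp only [List.append_nil, List.nil_append] at h
        rw [hf]
        exact h
      set news := pvNew g dist.keys ids with hnews
      set dist₂ := PySem.Dict.mk (dist.items ++ news.map (fun y => (y, ℓ + 1))) with hd2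
      have hitems2 : dist₂.items = dist.items ++ news.map (fun y => (y, ℓ + 1)) := rfl
      have hkeys2 : dist₂.keys = dist.keys ++ news := by
        simp only [PySem.Dict.keys, hitems2, List.map_append]
        rw [pvMapFst (ℓ + 1) news]
      have hnewsnodup : news.Nodup := pvNew_nodup g hadjn ids dist.keys
      have hnewsfresh : ∀ y ∈ news, y ∉ dist.keys := fun y hy => pvNew_not_mem_seen g ids dist.keys y hy
      have hnewssub : ∀ y ∈ news, y ∈ allN := by
        intro y hy
        obtain ⟨x, hx⟩ := pvNew_subset_adj g ids dist.keys y hy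
        exact hadjsub x y hx
      have hk2 : dist₂.keys.Nodup := by
        rw [hkeys2]
        exact List.Nodup.append h8 hnewsnodup (fun y hy hy' => hnewsfresh y hy' hy)
      have hsub2 : ∀ x ∈ dist₂.keys, x ∈ allN := by
        intro x hx
        rw [hkeys2] at hx
        rcases List.mem_append.mp hx with h | h
        · exact hsub x h
        · exact hnewssub x h
      -- A's level equals pvNew
      have hlevel : PySem.Set.diff
          (ids.foldl (fun a x => PySem.Set.union a (g.getD x PySem.Set.empty)) PySem.Set.empty)
          dist.keys = news := pvA_level g hadjn ids dist.keys
      -- unfold one step of pvLoopA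
      have hloop : pvLoopA g (k + 1) ids dist.keys =
          if PySem.Set.len news = 0 then news
          else pvLoopA g k news (PySem.Set.union dist.keys news) := by
        show (let aux := ids.foldl (fun a x => PySem.Set.union a (g.getD x PySem.Set.empty)) PySem.Set.empty
              let ids' := PySem.Set.diff aux dist.keys
              if PySem.Set.len ids' = 0 then ids'
              else pvLoopA g k ids' (PySem.Set.union dist.keys ids')) = _
        simp only [hlevel]
      have hunion : PySem.Set.union dist.keys news = dist₂.keys := by
        rw [hkeys2]
        exact PySem.Set.update_eq_append_of_disjoint dist.keys news hnewsnodup hnewsfresh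
      rw [hrun, hloop]
      by_cases hemp : news = []
      · rw [if_pos (by simp [PySem.Set.len, hemp])]
        rw [hemp, pvBfs_nilq]
        have hfil : dist₂.items.filter (fun p => p.2 == n) = [] := by
          rw [List.filter_eq_nil_iff]
          intro p hp
          rw [hitems2, hemp] at hp
          simp only [List.map_nil, List.append_nil, h1] at hp
          rcases List.mem_append.mp hp with h | h
          · have := h2 p h
            simp only [beq_iff_eq]
            omega
          · obtain ⟨x, _, rfl⟩ := List.mem_map.mp h
            simp only [beq_iff_eq]
            omega
        rw [hfil]
        rfl
      · rw [if_neg (by simpa [PySem.Set.len] using hemp)]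
        rw [hunion]
        -- fuel for the next stage
        have hlen2 : dist₂.keys.length = P.length + ids.length + news.length := by
          rw [hkeys2]; simp [hlenkeys]
        have hfuel2 : allN.length ≤ f₀ + dist.items.length := by
          have hle : dist₂.keys.length ≤ allN.length := pvLen_le hk2 (fun x hx => hsub2 x hx)
          have hlitems : dist.items.length = P.length + ids.length := by
            rw [h1]; simp
          omega
        cases k with
        | zero =>
            -- last level: drain the queue, every member has distance n
            have hn : ℓ + 1 = n := by push_cast at h4; omega
            have hdrain : ∀ x ∈ news, ¬ (dist₂.getD x 0 < n) := by
              intro x hx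
              have hmem : (x, ℓ + 1) ∈ dist₂.items := by
                rw [hitems2]
                exact List.mem_append.mpr (Or.inr (List.mem_map.mpr ⟨x, hx, rfl⟩))
              have := PySem.Dict.getD_of_mem_items dist₂ hmem hk2 (d0 := 0)
              rw [this, hn]
              omega
            have hnf : news.length ≤ f₀ := by
              have hle : dist₂.keys.length ≤ allN.length := pvLen_le hk2 (fun x hx => hsub2 x hx)
              omega
            have hsplit : f₀ = news.length + (f₀ - news.length) := by omega
            rw [hsplit, pvBfs_drain g n news _ dist₂ hdrain]
            -- now the filter picks exactly the last level
            have hfil : dist₂.items.filter (fun p => p.2 == n) = news.map (fun y => (y, n)) := by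
              rw [hitems2, List.filter_append, h1, List.filter_append]
              have e1 : P.filter (fun p => p.2 == n) = [] := by
                rw [List.filter_eq_nil_iff]
                intro p hp
                have := h2 p hp
                simp only [beq_iff_eq]
                omega
              have e2 : (ids.map (fun x => (x, ℓ))).filter (fun p => p.2 == n) = [] := by
                rw [List.filter_eq_nil_iff]
                intro p hp
                obtain ⟨x, _, rfl⟩ := List.mem_map.mp hp
                simp only [beq_iff_eq]
                omega
              have e3 : (news.map (fun y => (y, ℓ + 1))).filter (fun p => p.2 == n) =
                  news.map (fun y => (y, n)) := by
                rw [hn]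
                rw [List.filter_eq_self.mpr]
                intro p hp
                obtain ⟨x, _, rfl⟩ := List.mem_map.mp hp
                simp
              rw [e1, e2, e3]
              simp
            rw [hfil]
            show PySem.Set.ofList ((news.map (fun y => (y, n))).map (fun p => p.1)) = _
            rw [pvMapFst n news]
            exact PySem.Set.ofList_eq_self_of_nodup news hnewsnodup
        | succ k' =>
            apply ih news dist₂ dist.items (ℓ + 1) f₀ hitems2 _ hnewsnodup hk2 hsub2 _ _ (by omega)
            · intro p hp
              rw [h1] at hp
              rcases List.mem_append.mp hp with h | h
              · have := h2 p h; omega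
              · obtain ⟨x, _, rfl⟩ := List.mem_map.mp h; omega
            · exact hfuel2
            · push_cast at h4 ⊢
              omega

lemma pvGraphB_eq (data : List (Int × Int × Int)) : pvGraphB data = pvGraphA data := rfl

def pvPairs (data : List (Int × Int × Int)) : List (Int × Int) :=
  data.flatMap (fun t => [(t.1, t.2.1), (t.2.1, t.1)])

def pvNodes (data : List (Int × Int × Int)) : List Int :=
  data.flatMap (fun t => [t.1, t.2.1])

lemma pvGraphA_eq_pairs (data : List (Int × Int × Int)) :
    pvGraphA data =
      (pvPairs data).foldl
        (fun g p => g.insert p.1 (PySem.Set.add (g.getD p.1 PySem.Set.empty) p.2))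
        PySem.Dict.empty := by
  unfold pvGraphA pvPairs
  generalize (PySem.Dict.empty : PySem.Dict Int (PySem.Set Int)) = g0
  induction data generalizing g0 with
  | nil => rfl
  | cons t ts ih =>
      rw [List.foldl_cons, List.flatMap_cons, List.foldl_append]
      exact ih _

lemma pvPairsFold_adj_nodup : ∀ (ps : List (Int × Int)) (g : PySem.Dict Int (PySem.Set Int)),
    (∀ x, (pvAdj g x).Nodup) →
    ∀ x, (pvAdj (ps.foldl (fun g p => g.insert p.1 (PySem.Set.add (g.getD p.1 PySem.Set.empty) p.2)) g) x).Nodup := by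
  intro ps
  induction ps with
  | nil => intro g h x; exact h x
  | cons p ps ih =>
      intro g h x
      simp only [List.foldl_cons]
      apply ih
      intro z
      unfold pvAdj
      rw [PySem.Dict.getD_insert]
      split
      · exact PySem.Set.nodup_add _ _ (h p.1)
      · exact h z

lemma pvPairsFold_adj_sub : ∀ (ps : List (Int × Int)) (g : PySem.Dict Int (PySem.Set Int)) (x y : Int),
    y ∈ pvAdj (ps.foldl (fun g p => g.insert p.1 (PySem.Set.add (g.getD p.1 PySem.Set.empty) p.2)) g) x →
    y ∈ pvAdj g x ∨ ∃ p ∈ ps, y = p.2 := by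
  intro ps
  induction ps with
  | nil => intro g x y h; exact Or.inl h
  | cons p ps ih =>
      intro g x y h
      simp only [List.foldl_cons] at h
      rcases ih _ x y h with h' | h'
      · unfold pvAdj at h'
        rw [PySem.Dict.getD_insert] at h'
        by_cases hx : x = p.1
        · rw [if_pos hx] at h'
          rcases (PySem.Set.mem_add _ _ _).mp h' with h'' | h''
          · exact Or.inl (by unfold pvAdj; rw [hx]; exact h'')
          · exact Or.inr ⟨p, by simp, h''⟩
        · rw [if_neg hx] at h'
          exact Or.inl h'
      · exact Or.inr ⟨h'.choose, by
          obtain ⟨hm, he⟩ := h'.choose_spec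
          exact ⟨by simp [hm], he⟩⟩

lemma pvAdj_empty (x : Int) : pvAdj (PySem.Dict.empty : PySem.Dict Int (PySem.Set Int)) x = [] := rfl

lemma pvGraphA_adj_nodup (data : List (Int × Int × Int)) :
    ∀ x, (pvAdj (pvGraphA data) x).Nodup := by
  rw [pvGraphA_eq_pairs]
  apply pvPairsFold_adj_nodup
  intro x
  rw [pvAdj_empty]
  exact List.nodup_nil

lemma pvGraphA_adj_sub (data : List (Int × Int × Int)) (x y : Int)
    (h : y ∈ pvAdj (pvGraphA data) x) : y ∈ pvNodes data := by
  rw [pvGraphA_eq_pairs] at h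
  rcases pvPairsFold_adj_sub _ _ x y h with h' | ⟨p, hp, rfl⟩
  · rw [pvAdj_empty] at h'; simp at h'
  · unfold pvPairs at hp
    unfold pvNodes
    rw [List.mem_flatMap] at hp ⊢
    obtain ⟨t, ht, hpt⟩ := hp
    refine ⟨t, ht, ?_⟩
    simp only [List.mem_cons, List.mem_singleton] at hpt ⊢
    rcases hpt with rfl | hpt
    · simp
    · simp at hpt
      rw [hpt]
      simp

lemma pvNodes_length (data : List (Int × Int × Int)) :
    (pvNodes data).length = 2 * data.length := by
  unfold pvNodes
  induction data with
  | nil => rfl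
  | cons t ts ih => simp [List.flatMap_cons, ih]; omega

def pvAllN (data : List (Int × Int × Int)) : List Int :=
  PySem.Set.ofList (4724 :: pvNodes data)

theorem pv_spec_main (data : List (Int × Int × Int)) (n : Int) (hn : 0 ≤ n) :
    get_actors_with_bacon_number data n = get_actors_with_bacon_number_alt data n := by
  by_cases hn0 : n = 0
  · simp [get_actors_with_bacon_number, get_actors_with_bacon_number_alt, hn0]
  · have hn1 : 1 ≤ n := by omega
    unfold get_actors_with_bacon_number get_actors_with_bacon_number_alt
    rw [if_neg hn0, if_neg hn0, pvGraphB_eq]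
    set g := pvGraphA data with hg
    have hofl : (PySem.Set.ofList [4724] : List Int) = [4724] := rfl
    rw [hofl]
    have hd0items : ((PySem.Dict.empty : PySem.Dict Int Int).insert 4724 0).items = [(4724, (0 : Int))] := rfl
    have hd0keys : ((PySem.Dict.empty : PySem.Dict Int Int).insert 4724 0).keys = [4724] := rfl
    have hmain := pvMain g n (pvAllN data) (pvGraphA_adj_nodup data)
      (fun x y hy => by
        unfold pvAllN
        rw [PySem.Set.mem_ofList]
        exact List.mem_cons_of_mem _ (pvGraphA_adj_sub data x y hy))
      n.toNat [4724] (PySem.Dict.empty.insert 4724 0) [] 0 (1 + 2 * data.length)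
      (by rw [hd0items]; rfl)
      (by intro p hp; simp at hp)
      (by simp)
      (by rw [hd0keys]; simp)
      (by
        rw [hd0keys]
        intro x hx
        simp only [List.mem_singleton] at hx
        subst hx
        unfold pvAllN
        rw [PySem.Set.mem_ofList]
        simp)
      (by
        unfold pvAllN
        have h1 : (PySem.Set.ofList (4724 :: pvNodes data)).length ≤ (4724 :: pvNodes data).length :=
          PySem.Set.length_ofList_le _
        have h2 : (4724 :: pvNodes data).length = 1 + 2 * data.length := by
          simp [pvNodes_length data]; omega
        omega)
      (by simp [Int.toNat_of_nonneg hn])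
      (by omega)
    rw [hd0keys] at hmain
    exact hmain.symm

theorem pv_tight (data : List (Int × Int × Int)) (n : Int) (hn : n < 0) :
    get_actors_with_bacon_number data n ≠ get_actors_with_bacon_number_alt data n := by
  have hn0 : n ≠ 0 := by omega
  unfold get_actors_with_bacon_number get_actors_with_bacon_number_alt
  rw [if_neg hn0, if_neg hn0]
  have hA : pvLoopA (pvGraphA data) n.toNat (PySem.Set.ofList [4724]) (PySem.Set.ofList [4724]) = [4724] := by
    have : n.toNat = 0 := by omega
    rw [this]
    rfl
  rw [hA]
  show [4724] ≠ PySem.Set.ofList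
    (((pvBfs (pvGraphB data) n (1 + 2 * data.length) [4724]
        (PySem.Dict.empty.insert 4724 0)).items.filter (fun p => p.2 == n)).map (fun p => p.1))
  have hfuel : 1 + 2 * data.length = (2 * data.length) + 1 := by omega
  have hB : pvBfs (pvGraphB data) n (1 + 2 * data.length) [4724] (PySem.Dict.empty.insert 4724 0) =
      PySem.Dict.empty.insert 4724 0 := by
    rw [hfuel]
    show (let d := ((PySem.Dict.empty : PySem.Dict Int Int).insert 4724 0).getD 4724 0
          let neighbors := (pvGraphB data).getD 4724 PySem.Set.empty
          if d < n then
            let s := neighbors.foldl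
              (fun (s : PySem.Dict Int Int × List Int) nb =>
                if s.1.contains nb then s else (s.1.insert nb (d + 1), s.2 ++ [nb]))
              (PySem.Dict.empty.insert 4724 0, [])
            pvBfs (pvGraphB data) n (2 * data.length) s.2 s.1
          else pvBfs (pvGraphB data) n (2 * data.length) [] (PySem.Dict.empty.insert 4724 0)) = _
    have hd : ((PySem.Dict.empty : PySem.Dict Int Int).insert 4724 0).getD 4724 0 = 0 := rfl
    simp only [hd, if_neg (by omega : ¬ ((0:Int) < n))]
    exact pvBfs_nilq _ n _ _
  rw [hB]
  have hfil : (((PySem.Dict.empty : PySem.Dict Int Int).insert 4724 0).items.filter (fun p => p.2 == n)) = [] := by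
    have : ((PySem.Dict.empty : PySem.Dict Int Int).insert 4724 0).items = [(4724, (0:Int))] := rfl
    rw [this]
    simp only [List.filter_cons, List.filter_nil]
    have : ((0:Int) == n) = false := by
      simp only [beq_eq_false_iff_ne]
      omega
    rw [this]
    rfl
  rw [hfil]
  simp [PySem.Set.ofList]

-- ===== VERDICT (by name: the statement is the Claim_ definition above) =====
theorem get_actors_with_bacon_number_spec : Claim_unchanged_get_actors_with_bacon_number := by
  intro data n _ _
  unfold Spec_get_actors_with_bacon_number
  intro hnd
  have hn : 0 ≤ n := by
    unfold D_get_actors_with_bacon_number at hnd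
    omega
  exact pv_spec_main data n hn
theorem get_actors_with_bacon_number_changed : Claim_changed_get_actors_with_bacon_number := by
  unfold Claim_changed_get_actors_with_bacon_number; decide
theorem get_actors_with_bacon_number_tight : Claim_exact_get_actors_with_bacon_number := by
  intro data n _ _ hd
  unfold D_get_actors_with_bacon_number at hd
  exact pv_tight data n hd
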